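-- pv_equiv track=rewrite | github.com/bioinformatics-torvergata/RIG | scripts/prepare_new_rfam_release.py | createConstraint
-- ===== SOURCE A (Python) =====
-- consensus_symbols = ["A", "U", "C", "G"]
--
-- ss_symbols = ["<", ">", "(", ")", "[", "]", "{", "}", "-", "_", ":", ".", ","]
--
-- constraint_symbols = ["<", ">", "<", ">", "<", ">", "<", ">", "x", "x", "x", ".", "."]
--
-- def convertConstraint(constraint):
--     return "".join([constraint_symbols[ss_symbols.index(symbol)] for symbol in constraint])
--
-- def createConstraint(ss, consensus):
--     constraint = ""
--     for s, c in zip(ss, consensus):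
--         if c in consensus_symbols:
--             if s in ss_symbols:
--                 constraint += s
--             else:
--                 constraint += "-"
--         else:
--             constraint += "."
--     return convertConstraint(constraint)
-- ===== SOURCE B (Python) =====
-- def createConstraint(ss, consensus):
--     # Direct classification by character class: no symbol tables, no intermediate
--     # string, no index/lookup. Correct because A's two-stage mapping composes to
--     # exactly these classes: any opener "<([{" -> "<", any closer ">)]}" -> ">",
--     # "." or "," -> ".", and anything else (including "-_:" and non-ss symbols,
--     # which A first rewrites to "-") -> "x"; non-AUCG consensus columns -> ".".
--     out = []
--     for s, c in zip(ss, consensus):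
--         if c not in "AUCG":
--             out.append(".")
--         elif s in "<([{":
--             out.append("<")
--         elif s in ">)]}":
--             out.append(">")
--         elif s in ".,":
--             out.append(".")
--         else:
--             out.append("x")
--     return "".join(out)
-- ===== Notes on version B (the rewrite author's own statement) =====
-- stated objective: simpler
-- what changed: B drops A's symbol tables and two staged passes (intermediate constraint string, then re-map via list.index) and instead classifies each (ss, consensus) pair directly with a plain branch chain over character classes (openers, closers, dots, rest), emitting the final symbol in one pass.
import Mathlib
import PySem

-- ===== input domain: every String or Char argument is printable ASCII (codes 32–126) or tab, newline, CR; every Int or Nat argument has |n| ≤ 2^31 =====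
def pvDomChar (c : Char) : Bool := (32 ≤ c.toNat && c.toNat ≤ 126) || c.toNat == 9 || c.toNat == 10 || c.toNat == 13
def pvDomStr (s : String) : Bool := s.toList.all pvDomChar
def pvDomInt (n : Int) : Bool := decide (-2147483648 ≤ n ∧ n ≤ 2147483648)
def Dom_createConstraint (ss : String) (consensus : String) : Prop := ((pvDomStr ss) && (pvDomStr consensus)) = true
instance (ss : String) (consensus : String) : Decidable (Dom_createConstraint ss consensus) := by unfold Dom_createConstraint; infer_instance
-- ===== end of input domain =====

-- B replaces A's two staged table passes (build an intermediate constraint string, then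
-- re-map it via list.index) by one branch chain classifying each pair directly (simpler).

-- ===== PORT A =====
def consensusSymbols : List Char := ['A', 'U', 'C', 'G']
def ssSymbols : List Char := ['<', '>', '(', ')', '[', ']', '{', '}', '-', '_', ':', '.', ',']
def constraintSymbols : List Char := ['<', '>', '<', '>', '<', '>', '<', '>', 'x', 'x', 'x', '.', '.']

-- constraint_symbols[ss_symbols.index(symbol)]; on the intermediate string the index always
-- exists, so the '?' default is never reached (Python would raise ValueError there).
def convertConstraintChar (symbol : Char) : Char :=
  ((PySem.List.index? ssSymbols symbol).bind
    (fun i => PySem.List.pyGet? constraintSymbols (Int.ofNat i))).getD '?'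

def convertConstraint (constraint : List Char) : String :=
  String.mk (constraint.map convertConstraintChar)

def createConstraint (ss : String) (consensus : String) : String :=
  convertConstraint
    ((List.zip ss.toList consensus.toList).foldl
      (fun acc sc =>
        if sc.2 ∈ consensusSymbols then
          if sc.1 ∈ ssSymbols then acc ++ [sc.1] else acc ++ ['-']
        else acc ++ ['.'])
      [])

-- ===== PORT B =====
def createConstraint_alt (ss : String) (consensus : String) : String :=
  String.mk
    ((List.zip ss.toList consensus.toList).foldl
      (fun out sc =>
        if sc.2 ∉ "AUCG".toList then out ++ ['.']
        else if sc.1 ∈ "<([{".toList then out ++ ['<']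
        else if sc.1 ∈ ">)]}".toList then out ++ ['>']
        else if sc.1 ∈ ".,".toList then out ++ ['.']
        else out ++ ['x'])
      [])

-- ===== PRECONDITION & SPEC =====
def Spec_createConstraint (ss : String) (consensus : String) (out : String) : Prop := out = createConstraint_alt ss consensus
instance (ss : String) (consensus : String) (out : String) : Decidable (Spec_createConstraint ss consensus out) := by unfold Spec_createConstraint; infer_instance

-- ===== CLAIM (what is proved, stated in full; the proofs are below) =====
def Claim_equal_createConstraint : Prop := ∀ (ss : String) (consensus : String), Dom_createConstraint ss consensus → Spec_createConstraint ss consensus (createConstraint ss consensus)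

-- ===== LEMMAS AND PROOFS =====

-- the char A stores in the intermediate string
def aStep (sc : Char × Char) : Char :=
  if sc.2 ∈ consensusSymbols then (if sc.1 ∈ ssSymbols then sc.1 else '-') else '.'

-- the char B emits
def bStep (sc : Char × Char) : Char :=
  if sc.2 ∉ "AUCG".toList then '.'
  else if sc.1 ∈ "<([{".toList then '<'
  else if sc.1 ∈ ">)]}".toList then '>'
  else if sc.1 ∈ ".,".toList then '.'
  else 'x'

theorem aStep_convert (sc : Char × Char) :
    convertConstraintChar (aStep sc) = bStep sc := by
  obtain ⟨s, c⟩ := sc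
  by_cases hc : c ∈ consensusSymbols
  · have hc' : c ∈ "AUCG".toList := hc
    by_cases hs : s ∈ ssSymbols
    · simp only [aStep, bStep]
      rw [if_pos hc, if_pos hs, if_neg (not_not_intro hc')]
      fin_cases hs <;> rfl
    · have h1 : s ∉ "<([{".toList := fun h => hs (by fin_cases h <;> decide)
      have h2 : s ∉ ">)]}".toList := fun h => hs (by fin_cases h <;> decide)
      have h3 : s ∉ ".,".toList := fun h => hs (by fin_cases h <;> decide)
      simp only [aStep, bStep]
      rw [if_pos hc, if_neg hs, if_neg (not_not_intro hc'), if_neg h1, if_neg h2, if_neg h3]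
      decide
  · have hc' : c ∉ "AUCG".toList := hc
    simp only [aStep, bStep]
    rw [if_neg hc, if_pos hc']
    decide

theorem fold_eq_map_a (l : List (Char × Char)) :
    l.foldl
      (fun acc sc =>
        if sc.2 ∈ consensusSymbols then
          if sc.1 ∈ ssSymbols then acc ++ [sc.1] else acc ++ ['-']
        else acc ++ ['.'])
      [] = l.map aStep := by
  have harg :
      (fun (acc : List Char) (sc : Char × Char) =>
        if sc.2 ∈ consensusSymbols then
          if sc.1 ∈ ssSymbols then acc ++ [sc.1] else acc ++ ['-']
        else acc ++ ['.'])
      = (fun acc sc => acc ++ [aStep sc]) := by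
    funext acc sc
    unfold aStep
    by_cases hc : sc.2 ∈ consensusSymbols <;> by_cases hs : sc.1 ∈ ssSymbols <;> simp [hc, hs]
  rw [harg, PySem.List.foldl_append_singleton_eq_map]; simp

theorem fold_eq_map_b (l : List (Char × Char)) :
    l.foldl
      (fun out sc =>
        if sc.2 ∉ "AUCG".toList then out ++ ['.']
        else if sc.1 ∈ "<([{".toList then out ++ ['<']
        else if sc.1 ∈ ">)]}".toList then out ++ ['>']
        else if sc.1 ∈ ".,".toList then out ++ ['.']
        else out ++ ['x'])
      [] = l.map bStep := by
  have harg :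
      (fun (out : List Char) (sc : Char × Char) =>
        if sc.2 ∉ "AUCG".toList then out ++ ['.']
        else if sc.1 ∈ "<([{".toList then out ++ ['<']
        else if sc.1 ∈ ">)]}".toList then out ++ ['>']
        else if sc.1 ∈ ".,".toList then out ++ ['.']
        else out ++ ['x'])
      = (fun out sc => out ++ [bStep sc]) := by
    funext out sc
    unfold bStep
    split_ifs <;> rfl
  rw [harg, PySem.List.foldl_append_singleton_eq_map]; simp

theorem createConstraint_eq (ss consensus : String) :
    createConstraint ss consensus = createConstraint_alt ss consensus := by
  unfold createConstraint createConstraint_alt convertConstraint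
  rw [fold_eq_map_a, fold_eq_map_b, List.map_map]
  congr 1
  exact List.map_congr_left (fun sc _ => aStep_convert sc)

-- ===== VERDICT (by name: the statement is the Claim_ definition above) =====
theorem createConstraint_spec : Claim_equal_createConstraint := by
  intro ss consensus _
  exact createConstraint_eq ss consensus
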